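-- pv_equiv track=rewrite | github.com/victorFish9/data_structures-algorithms | part03/theory.py | count_splits2
-- ===== SOURCE A (Python) =====
-- def count_splits2(numbers):
--     n = len(numbers)
--     result = 0
--     left_sum = 0
--     for i in range(n - 1):
--         left_sum += numbers[i]
--         right_sum = sum(numbers[i+1:])
--         if left_sum == right_sum:
--             result += 1
--     return result
-- ===== SOURCE B (Python) =====
-- def count_splits2(numbers):
--     total = sum(numbers)
--     left = 0
--     result = 0
--     for x in numbers[:-1]:
--         left += x
--         if 2 * left == total:
--             result += 1
--     return result
-- ===== Notes on version B (the rewrite author's own statement) =====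
-- stated objective: faster
-- what changed: Replaces the per-index re-summation of the right slice with a single precomputed total and a running left sum, comparing 2*left == total.
import Mathlib
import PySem

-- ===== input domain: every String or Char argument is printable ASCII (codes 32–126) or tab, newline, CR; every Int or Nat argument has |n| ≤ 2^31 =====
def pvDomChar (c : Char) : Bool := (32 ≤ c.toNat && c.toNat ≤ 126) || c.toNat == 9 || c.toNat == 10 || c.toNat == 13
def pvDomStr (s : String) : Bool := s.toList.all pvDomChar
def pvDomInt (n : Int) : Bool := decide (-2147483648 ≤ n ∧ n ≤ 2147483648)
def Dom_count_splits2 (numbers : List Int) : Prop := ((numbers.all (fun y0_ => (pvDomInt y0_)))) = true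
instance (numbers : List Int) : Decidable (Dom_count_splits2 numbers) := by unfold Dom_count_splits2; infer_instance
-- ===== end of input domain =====

-- B replaces A's per-index re-summation of the right slice (O(n^2)) with a
-- precomputed total and a running left sum (O(n)); same return value everywhere.

-- ===== PORT A =====
-- for i in range(n-1): left_sum += numbers[i]; right_sum = sum(numbers[i+1:]); if ==: result += 1
def count_splits2 (numbers : List Int) : Int :=
  let n : Int := numbers.length
  ((PySem.List.pyRange 0 (n - 1) 1).foldl
    (fun (st : Int × Int) i =>
      let left_sum := st.2 + PySem.List.pyGetD numbers i 0   -- index always in range here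
      let right_sum := (PySem.List.slice numbers (some (i + 1)) none).sum
      (if left_sum = right_sum then st.1 + 1 else st.1, left_sum))
    (0, 0)).1

-- ===== PORT B =====
-- total = sum(numbers); for x in numbers[:-1]: left += x; if 2*left == total: result += 1
def count_splits2_alt (numbers : List Int) : Int :=
  let total : Int := numbers.sum
  ((PySem.List.slice numbers none (some (-1))).foldl
    (fun (st : Int × Int) x =>
      let left := st.1 + x
      (left, if 2 * left = total then st.2 + 1 else st.2))
    (0, 0)).2

-- ===== PRECONDITION & SPEC =====
def Spec_count_splits2 (numbers : List Int) (out : Int) : Prop := out = count_splits2_alt numbers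
instance (numbers : List Int) (out : Int) : Decidable (Spec_count_splits2 numbers out) := by unfold Spec_count_splits2; infer_instance

-- ===== CLAIM (what is proved, stated in full; the proofs are below) =====
def Claim_equal_count_splits2 : Prop := ∀ (numbers : List Int), Dom_count_splits2 numbers → Spec_count_splits2 numbers (count_splits2 numbers)

-- ===== LEMMAS AND PROOFS =====

-- reference count: split points of `rest`, `left` = sum already to the left
def csRef (left : Int) : List Int → Int
  | [] => 0
  | x :: xs => if xs = [] then 0 else (if left + x = xs.sum then 1 else 0) + csRef (left + x) xs

theorem csRef_short (left : Int) (l : List Int) (h : l.length ≤ 1) : csRef left l = 0 := by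
  match l, h with
  | [], _ => rfl
  | [x], _ => simp [csRef]

theorem A_loop (numbers : List Int) : ∀ (k i : Nat) (result left : Int),
    numbers.length ≤ i + k →
    ((PySem.List.pyRange (i : Int) ((numbers.length : Int) - 1) 1).foldl
      (fun (st : Int × Int) j =>
        let left_sum := st.2 + PySem.List.pyGetD numbers j 0
        let right_sum := (PySem.List.slice numbers (some (j + 1)) none).sum
        (if left_sum = right_sum then st.1 + 1 else st.1, left_sum))
      (result, left)).1 = result + csRef left (numbers.drop i) := by
  intro k
  induction k with
  | zero =>
    intro i result left hik
    have hempty : PySem.List.pyRange (i : Int) ((numbers.length : Int) - 1) 1 = [] := by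
      rw [PySem.List.pyRange_one]
      have : ((numbers.length : Int) - 1 - i).toNat = 0 := by omega
      simp [this]
    rw [hempty]
    have : numbers.drop i = [] := List.drop_eq_nil_of_le (by omega)
    simp [this, csRef]
  | succ k ih =>
    intro i result left hik
    by_cases hlt : (i : Int) < (numbers.length : Int) - 1
    · -- i + 1 < length : one real iteration
      have hi1 : i + 1 < numbers.length := by omega
      rw [PySem.List.pyRange_one_cons hlt]
      simp only [List.foldl_cons]
      have hget : PySem.List.pyGetD numbers (i : Int) 0 = numbers[i] := by
        rw [PySem.List.pyGetD_natCast]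
        exact List.getD_eq_getElem _ _ (by omega)
      have hslice : PySem.List.slice numbers (some ((i : Int) + 1)) none
          = numbers.drop (i + 1) := by
        have : ((i : Int) + 1) = ((i + 1 : Nat) : Int) := by push_cast; ring
        rw [this, PySem.List.slice_from_natCast]
      have hcast : (i : Int) + 1 = ((i + 1 : Nat) : Int) := by push_cast; ring
      rw [hget, hslice, hcast, ih (i + 1) _ _ (by omega)]
      have hdrop : numbers.drop i = numbers[i] :: numbers.drop (i + 1) :=
        List.drop_eq_getElem_cons (by omega)
      have hne : numbers.drop (i + 1) ≠ [] := by
        intro h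
        have := List.drop_eq_nil_iff.mp h
        omega
      rw [hdrop]
      simp only [csRef]
      rw [if_neg hne]
      split_ifs <;> ring
    · -- range is empty and at most one element remains
      have hempty : PySem.List.pyRange (i : Int) ((numbers.length : Int) - 1) 1 = [] := by
        rw [PySem.List.pyRange_one]
        have : ((numbers.length : Int) - 1 - i).toNat = 0 := by omega
        simp [this]
      rw [hempty]
      have hlen : (numbers.drop i).length ≤ 1 := by
        rw [List.length_drop]; omega
      simp [csRef_short left _ hlen]

theorem B_loop : ∀ (ys : List Int) (left result total : Int),
    total = left + ys.sum →
    (ys.dropLast.foldl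
      (fun (st : Int × Int) x =>
        let l := st.1 + x
        (l, if 2 * l = total then st.2 + 1 else st.2))
      (left, result)).2 = result + csRef left ys := by
  intro ys
  induction ys with
  | nil => intro left result total _; simp [csRef]
  | cons x xs ih =>
    intro left result total htot
    cases xs with
    | nil => simp [csRef]
    | cons y t =>
      rw [List.dropLast_cons₂, List.foldl_cons]
      simp only
      rw [ih (left + x) _ total (by simp at htot ⊢; linarith)]
      have hcond : (2 * (left + x) = total) ↔ (left + x = (y :: t).sum) := by
        constructor <;> intro h <;> [skip; skip] <;>
          (simp [List.sum_cons] at htot h ⊢; linarith)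
      simp only [csRef]
      rw [if_neg (List.cons_ne_nil y t)]
      rw [if_congr hcond rfl rfl]
      split_ifs <;> ring

-- ===== VERDICT (by name: the statement is the Claim_ definition above) =====
theorem count_splits2_spec : Claim_equal_count_splits2 := by
  intro numbers _
  unfold Spec_count_splits2 count_splits2 count_splits2_alt
  simp only
  rw [PySem.List.slice_to_neg_one]
  have hA := A_loop numbers numbers.length 0 0 0 (by omega)
  have hB := B_loop numbers 0 0 numbers.sum (by ring)
  have h0 : ((0 : Nat) : Int) = (0 : Int) := by norm_num
  rw [h0] at hA
  rw [hA, hB]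
  simp
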